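-- pv_equiv track=rewrite | github.com/Taoooo9/SMP2020 | Units/units.py | find_char_maxlen
-- ===== SOURCE A (Python) =====
-- def find_char_maxlen(batch):
--     max_premise_len = 0
--     max_hypothesis_len = 0
--     max_premise_char_len = 0
--     max_hypothesis_char_len = 0
--     for one_batch in batch:
--         if len(one_batch[0]) > max_premise_len:
--             max_premise_len = len(one_batch[0])
--         for word in one_batch[0]:
--             if len(word) > max_premise_char_len:
--                 max_premise_char_len = len(word)
--         for hypothesis in one_batch[1:3]:
--             if len(hypothesis) > max_hypothesis_len:
--                 max_hypothesis_len = len(hypothesis)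
--             for word in hypothesis:
--                 if len(word) > max_hypothesis_char_len:
--                     max_hypothesis_char_len = len(word)
--     return max_premise_len, max_premise_char_len, max_hypothesis_len, max_hypothesis_char_len
-- ===== SOURCE B (Python) =====
-- def find_char_maxlen(batch):
--     premises = [b[0] for b in batch]
--     hypotheses = [h for b in batch for h in b[1:3]]
--
--     def _top(lengths):
--         s = sorted(lengths, reverse=True)
--         return s[0] if s else 0
--
--     return (_top([len(p) for p in premises]),
--             _top([len(w) for p in premises for w in p]),
--             _top([len(h) for h in hypotheses]),
--             _top([len(w) for h in hypotheses for w in h]))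
-- ===== Notes on version B (the rewrite author's own statement) =====
-- stated objective: alternative
-- what changed: Replaces the fused running-max tracking loop by a selection-by-sorting strategy: first flatten the batch into premise and hypothesis lists, then for each of the four statistics sort the list of lengths in descending order and take its head (0 when empty).
import Mathlib
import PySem

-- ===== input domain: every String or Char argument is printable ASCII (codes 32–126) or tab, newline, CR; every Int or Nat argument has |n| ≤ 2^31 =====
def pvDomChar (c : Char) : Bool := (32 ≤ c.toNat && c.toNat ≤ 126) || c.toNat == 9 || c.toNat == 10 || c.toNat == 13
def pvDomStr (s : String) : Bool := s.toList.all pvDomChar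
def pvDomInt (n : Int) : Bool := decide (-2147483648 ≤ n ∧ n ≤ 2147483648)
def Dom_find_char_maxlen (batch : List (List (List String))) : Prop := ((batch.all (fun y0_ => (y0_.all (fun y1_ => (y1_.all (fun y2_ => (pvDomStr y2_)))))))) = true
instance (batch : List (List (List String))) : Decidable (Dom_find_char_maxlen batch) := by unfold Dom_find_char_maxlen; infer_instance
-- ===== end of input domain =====

-- B replaces A's fused running-max loop by flattening plus selection-by-sorting: sort each length list descending and take its head (return value only, no mutation).

-- ===== PORT A =====
-- one iteration of A's outer loop: updates the four running maxima for one `one_batch`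
def stepA (st : Int × Int × Int × Int) (one_batch : List (List String)) : Int × Int × Int × Int :=
  let p := (PySem.List.pyGet? one_batch 0).getD []   -- one_batch[0]; Pre_ guarantees it exists
  let mp := if (p.length : Int) > st.1 then (p.length : Int) else st.1
  let mpc := p.foldl (fun acc w => if PySem.Str.len w > acc then PySem.Str.len w else acc) st.2.1
  let hs := PySem.List.slice one_batch (some 1) (some 3)   -- one_batch[1:3]
  let mhp := hs.foldl (fun (s : Int × Int) h =>
      let mh := if (h.length : Int) > s.1 then (h.length : Int) else s.1
      let mhc := h.foldl (fun acc w => if PySem.Str.len w > acc then PySem.Str.len w else acc) s.2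
      (mh, mhc)) (st.2.2.1, st.2.2.2)
  (mp, mpc, mhp.1, mhp.2)

def find_char_maxlen (batch : List (List (List String))) : Int × Int × Int × Int :=
  batch.foldl stepA (0, 0, 0, 0)

-- ===== PORT B =====
-- B's helper _top: sort the lengths descending, take the head (0 if empty)
def topB (lengths : List Int) : Int :=
  let s := PySem.List.sorted lengths (fun y => y) true
  if s ≠ [] then (PySem.List.pyGet? s 0).getD 0 else 0

def find_char_maxlen_alt (batch : List (List (List String))) : Int × Int × Int × Int :=
  let premises := batch.map (fun b => (PySem.List.pyGet? b 0).getD [])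
  let hypotheses := batch.flatMap (fun b => PySem.List.slice b (some 1) (some 3))
  (topB (premises.map (fun p => (p.length : Int))),
   topB ((premises.flatMap (fun p => p)).map PySem.Str.len),
   topB (hypotheses.map (fun h => (h.length : Int))),
   topB ((hypotheses.flatMap (fun h => h)).map PySem.Str.len))

-- ===== PRECONDITION & SPEC =====
-- Pre_ excludes exactly the inputs where Python A raises IndexError: a one_batch with no element, on which one_batch[0] fails (B raises there too).
def Pre_find_char_maxlen (batch : List (List (List String))) : Prop :=
  batch.all (fun one_batch => !one_batch.isEmpty) = true
instance (batch : List (List (List String))) : Decidable (Pre_find_char_maxlen batch) := by unfold Pre_find_char_maxlen; infer_instance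

def pvWitness_find_char_maxlen : List (List (List String)) := [[["ab"], ["c", "de"], ["f"]], [["xyz"]]]

def Spec_find_char_maxlen (batch : List (List (List String))) (out : Int × Int × Int × Int) : Prop := out = find_char_maxlen_alt batch
instance (batch : List (List (List String))) (out : Int × Int × Int × Int) : Decidable (Spec_find_char_maxlen batch out) := by unfold Spec_find_char_maxlen; infer_instance

-- ===== CLAIM (what is proved, stated in full; the proofs are below) =====
def Claim_equal_find_char_maxlen : Prop := ∀ (batch : List (List (List String))), Dom_find_char_maxlen batch → Pre_find_char_maxlen batch → Spec_find_char_maxlen batch (find_char_maxlen batch)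

-- ===== LEMMAS AND PROOFS =====

-- A's update `if x > acc then x else acc` is just `max acc x`
theorem if_gt_eq_max (a x : Int) : (if x > a then x else a) = max a x := by
  rw [max_def]; split <;> split <;> omega

-- the four value lists B takes maxima of
def l1 (batch : List (List (List String))) : List Int :=
  batch.map (fun b => (((PySem.List.pyGet? b 0).getD []).length : Int))
def l2 (batch : List (List (List String))) : List Int :=
  (batch.flatMap (fun b => (PySem.List.pyGet? b 0).getD [])).map PySem.Str.len
def l3 (batch : List (List (List String))) : List Int :=
  (batch.flatMap (fun b => PySem.List.slice b (some 1) (some 3))).map (fun h => (h.length : Int))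
def l4 (batch : List (List (List String))) : List Int :=
  ((batch.flatMap (fun b => PySem.List.slice b (some 1) (some 3))).flatMap (fun h => h)).map PySem.Str.len

-- A's inner hypothesis fold, componentwise
theorem hyp_fold (hs : List (List String)) (mh mhc : Int) :
    hs.foldl (fun (s : Int × Int) h =>
      ((if (h.length : Int) > s.1 then (h.length : Int) else s.1),
       h.foldl (fun acc w => if PySem.Str.len w > acc then PySem.Str.len w else acc) s.2)) (mh, mhc)
    = ((hs.map (fun h => (h.length : Int))).foldl max mh,
       ((hs.flatMap (fun h => h)).map PySem.Str.len).foldl max mhc) := by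
  induction hs generalizing mh mhc with
  | nil => rfl
  | cons h t ih =>
      rw [List.foldl_cons, ih]
      simp [List.foldl_map, if_gt_eq_max]

-- A's whole fold computes the componentwise running maxima of the four lists
theorem foldA_eq (batch : List (List (List String))) (mp mpc mh mhc : Int) :
    batch.foldl stepA (mp, mpc, mh, mhc)
    = ((l1 batch).foldl max mp, (l2 batch).foldl max mpc,
       (l3 batch).foldl max mh, (l4 batch).foldl max mhc) := by
  induction batch generalizing mp mpc mh mhc with
  | nil => rfl
  | cons b t ih =>
      simp only [List.foldl_cons, stepA, hyp_fold]
      rw [ih]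
      simp [l1, l2, l3, l4, List.foldl_map, if_gt_eq_max]

-- B's sort-and-take-head equals A's running max from 0, for nonnegative values
theorem topB_eq_foldl_max (xs : List Int) (h : ∀ x ∈ xs, 0 ≤ x) :
    topB xs = xs.foldl max 0 := by
  unfold topB
  cases hs : PySem.List.sorted xs (fun y => y) true with
  | nil =>
      have : xs = [] := (PySem.List.sorted_eq_nil_iff xs (fun y => y) true).mp hs
      simp [this]
  | cons m t =>
      have hge : ∀ y ∈ xs, y ≤ m := by
        have := PySem.List.key_head_sorted_rev_ge (xs := xs) (key := fun y => y) hs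
        simpa using this
      have hm : m ∈ xs := by
        have : m ∈ PySem.List.sorted xs (fun y => y) true := by rw [hs]; exact List.mem_cons_self
        exact (PySem.List.mem_sorted xs (fun y => y) true m).mp this
      have hub : ∀ y ∈ xs, y ≤ xs.foldl max 0 := (PySem.List.le_foldl_max xs 0).2
      have hmem := PySem.List.foldl_max_mem xs 0
      have hle : xs.foldl max 0 ≤ m := by
        rcases hmem with h0 | hin
        · rw [h0]; exact h m hm
        · exact hge _ hin
      have : m = xs.foldl max 0 := le_antisymm (hub m hm) hle
      simp [PySem.List.pyGet?, PySem.List.pyIdx?, this]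

theorem str_len_nonneg (w : String) : 0 ≤ PySem.Str.len w := by
  simp [PySem.Str.len_eq]

theorem l1_nonneg (batch : List (List (List String))) : ∀ x ∈ l1 batch, 0 ≤ x := by
  intro x hx; unfold l1 at hx; rw [List.mem_map] at hx
  obtain ⟨b, _, rfl⟩ := hx; exact Int.natCast_nonneg _

theorem l2_nonneg (batch : List (List (List String))) : ∀ x ∈ l2 batch, 0 ≤ x := by
  intro x hx; unfold l2 at hx; rw [List.mem_map] at hx
  obtain ⟨w, _, rfl⟩ := hx; exact str_len_nonneg w

theorem l3_nonneg (batch : List (List (List String))) : ∀ x ∈ l3 batch, 0 ≤ x := by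
  intro x hx; unfold l3 at hx; rw [List.mem_map] at hx
  obtain ⟨h, _, rfl⟩ := hx; exact Int.natCast_nonneg _

theorem l4_nonneg (batch : List (List (List String))) : ∀ x ∈ l4 batch, 0 ≤ x := by
  intro x hx; unfold l4 at hx; rw [List.mem_map] at hx
  obtain ⟨w, _, rfl⟩ := hx; exact str_len_nonneg w

-- B's four argument lists are exactly l1..l4 (flatten-then-map reshuffles)
theorem alt_lists (batch : List (List (List String))) :
    find_char_maxlen_alt batch = (topB (l1 batch), topB (l2 batch), topB (l3 batch), topB (l4 batch)) := by
  unfold find_char_maxlen_alt l1 l2 l3 l4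
  simp [List.map_map, List.flatMap_map, Function.comp_def]

-- ===== VERDICT (by name: the statement is the Claim_ definition above) =====
theorem find_char_maxlen_spec : Claim_equal_find_char_maxlen := by
  unfold Claim_equal_find_char_maxlen
  intro batch _ _
  unfold Spec_find_char_maxlen find_char_maxlen
  rw [foldA_eq, alt_lists,
      topB_eq_foldl_max _ (l1_nonneg batch), topB_eq_foldl_max _ (l2_nonneg batch),
      topB_eq_foldl_max _ (l3_nonneg batch), topB_eq_foldl_max _ (l4_nonneg batch)]
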